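-- pv_equiv track=rewrite | github.com/gustavobastian/exercises-DASSOPG | class-1/Ejercicios_extras/6/6_3.py | insert3
-- ===== SOURCE A (Python) =====
-- def insert3(string, char, max):
--     s=string[0]
--     count=0
--     for i in range (1, len(string)):
--         if ((i%3==0) and (count<max)):
--             s+= str(char)+string[i]
--             count+=1
--         else : s+=string[i]
--     return s
-- ===== SOURCE B (Python) =====
-- def insert3(string, char, max):
--     # Closed-form join: compute how many separators are inserted (k), then build
--     # the result as one char-join of the first k+1 chunks plus the plain rest.
--     chunks = [string[i:i+3] for i in range(0, len(string), 3)]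
--     k = min(len(chunks) - 1, max) if max > 0 else 0
--     return str(char).join(chunks[:k+1]) + ''.join(chunks[k+1:])
-- ===== Notes on version B (the rewrite author's own statement) =====
-- stated objective: alternative
-- what changed: B replaces A's per-character counting loop with a closed form: it computes the number of separators k directly, then builds the result as one char-join of the first k+1 three-char chunks plus the concatenation of the rest.
import Mathlib
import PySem

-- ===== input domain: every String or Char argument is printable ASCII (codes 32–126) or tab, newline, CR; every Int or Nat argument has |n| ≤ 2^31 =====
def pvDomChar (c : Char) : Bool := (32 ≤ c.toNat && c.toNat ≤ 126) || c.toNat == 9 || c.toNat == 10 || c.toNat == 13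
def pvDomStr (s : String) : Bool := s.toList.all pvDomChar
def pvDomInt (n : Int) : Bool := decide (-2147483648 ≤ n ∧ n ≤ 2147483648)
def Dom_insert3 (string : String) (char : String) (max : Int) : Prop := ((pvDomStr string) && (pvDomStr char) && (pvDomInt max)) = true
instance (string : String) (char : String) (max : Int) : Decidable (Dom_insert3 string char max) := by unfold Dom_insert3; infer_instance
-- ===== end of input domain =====

-- B replaces A's per-character counting loop by a closed form: the number of separators k
-- is computed directly and the result is one join of the first k+1 three-char chunks plus
-- the concatenation of the rest (alternative decomposition, same cost).


-- ===== PORT A =====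
-- literal transliteration of A: s = string[0]; for i in range(1, len(string)):
--   if i%3==0 and count<max: s += char + string[i]; count += 1  else: s += string[i]
def insert3 (string : String) (char : String) (max : Int) : String :=
  let cs := string.toList
  -- string[0] raises IndexError on "" (excluded by Pre_); the default ' ' is never used inside Pre_
  let s0 : List Char := [PySem.List.pyGetD cs 0 ' ']
  let r := (PySem.List.pyRange 1 (cs.length : Int) 1).foldl
    (fun (st : List Char × Int) i =>
      if PySem.Int.mod i 3 = 0 ∧ st.2 < max then
        (st.1 ++ char.toList ++ [PySem.List.pyGetD cs i ' '], st.2 + 1)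
      else
        (st.1 ++ [PySem.List.pyGetD cs i ' '], st.2))
    (s0, (0 : Int))
  String.mk r.1

-- ===== PORT B =====
-- transliteration of B: chunks = [string[i:i+3] for i in range(0, len(string), 3)];
-- k = min(len(chunks)-1, max) if max > 0 else 0
-- return char.join(chunks[:k+1]) + ''.join(chunks[k+1:])
def insert3_alt (string : String) (char : String) (max : Int) : String :=
  let cs := string.toList
  let chunks := (PySem.List.pyRange 0 (cs.length : Int) 3).map
    (fun i => PySem.List.slice cs (some i) (some (i + 3)))
  let k : Int := if 0 < max then min ((chunks.length : Int) - 1) max else 0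
  String.mk
    (List.intercalate char.toList (PySem.List.slice chunks none (some (k + 1)))
      ++ (PySem.List.slice chunks (some (k + 1)) none).flatten)

-- ===== PRECONDITION & SPEC =====
-- Pre_ excludes only the empty string, on which A raises IndexError (string[0]).
def Pre_insert3 (string : String) (char : String) (max : Int) : Prop := string ≠ ""
instance (string : String) (char : String) (max : Int) : Decidable (Pre_insert3 string char max) := by unfold Pre_insert3; infer_instance
def pvWitness_insert3 : String × String × Int := ("abcdefg", "-", 2)

def Spec_insert3 (string : String) (char : String) (max : Int) (out : String) : Prop := out = insert3_alt string char max
instance (string : String) (char : String) (max : Int) (out : String) : Decidable (Spec_insert3 string char max out) := by unfold Spec_insert3; infer_instance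

-- ===== CLAIM (what is proved, stated in full; the proofs are below) =====
def Claim_equal_insert3 : Prop := ∀ (string : String) (char : String) (max : Int), Dom_insert3 string char max → Pre_insert3 string char max → Spec_insert3 string char max (insert3 string char max)
-- ===== LEMMAS AND PROOFS =====

-- proof-side recursion equivalent to A's loop: remaining chars u, first one at index j
def gA (ch : List Char) (max : Int) : List Char → Nat → List Char × Int → List Char × Int
  | [], _, st => st
  | x :: u, j, st =>
      if PySem.Int.mod (j : Int) 3 = 0 ∧ st.2 < max then
        gA ch max u (j + 1) (st.1 ++ ch ++ [x], st.2 + 1)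
      else
        gA ch max u (j + 1) (st.1 ++ [x], st.2)

-- proof-side chunk list: what B's map over pyRange 0 n 3 builds
def chunksOf : List Char → List (List Char)
  | [] => []
  | x :: u => ((x :: u).take 3) :: chunksOf ((x :: u).drop 3)
termination_by l => l.length
decreasing_by simp

-- the fold body A's loop performs at chunk granularity, named for the proofs
def stepB (ch : List Char) (max : Int) (st : List Char × Int) (chunk : List Char) : List Char × Int :=
  if st.2 < max then (st.1 ++ ch ++ chunk, st.2 + 1) else (st.1 ++ chunk, st.2)

-- proof-side recursion computing what the chunk fold appends after the seed
def joinWith (ch : List Char) (max : Int) : Int → List (List Char) → List Char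
  | _, [] => []
  | c, x :: L => if c < max then ch ++ x ++ joinWith ch max (c + 1) L else x ++ joinWith ch max c L

lemma mod3_natCast (m : Nat) : PySem.Int.mod ((m : Nat) : Int) 3 = ((m % 3 : Nat) : Int) := by
  exact_mod_cast PySem.Int.mod_natCast m 3

-- A's foldl over pyRange j n 1 with pyGetD is gA over the dropped suffix
lemma foldA (cs ch : List Char) (max : Int) :
    ∀ (n j : Nat), cs.length - j = n → ∀ (st : List Char × Int),
    (PySem.List.pyRange (j : Int) (cs.length : Int) 1).foldl
      (fun (st : List Char × Int) i =>
        if PySem.Int.mod i 3 = 0 ∧ st.2 < max then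
          (st.1 ++ ch ++ [PySem.List.pyGetD cs i ' '], st.2 + 1)
        else
          (st.1 ++ [PySem.List.pyGetD cs i ' '], st.2)) st
    = gA ch max (cs.drop j) j st := by
  intro n
  induction n with
  | zero =>
      intro j hj st
      have hle : cs.length ≤ j := by omega
      rw [PySem.List.pyRange_one_eq_nil (by exact_mod_cast hle), List.drop_eq_nil_of_le hle]
      rfl
  | succ n ih =>
      intro j hj st
      have hlt : j < cs.length := by omega
      rw [PySem.List.pyRange_one_cons (by exact_mod_cast hlt), List.drop_eq_getElem_cons hlt]
      simp only [List.foldl_cons, gA]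
      have hget : PySem.List.pyGetD cs ((j : Nat) : Int) ' ' = cs[j] := by
        simp [PySem.List.pyGetD_natCast, List.getD_eq_getElem?_getD, hlt]
      by_cases h : PySem.Int.mod ((j : Nat) : Int) 3 = 0 ∧ st.2 < max
      · rw [if_pos h, if_pos h, hget]
        have := ih (j + 1) (by omega) (st.1 ++ ch ++ [cs[j]], st.2 + 1)
        rw [← this]
        norm_cast
      · rw [if_neg h, if_neg h, hget]
        have := ih (j + 1) (by omega) (st.1 ++ [cs[j]], st.2)
        rw [← this]
        norm_cast

-- step-3 range cons / shift lemmas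
lemma pyRange3_cons (n : Int) (h : 0 < n) :
    PySem.List.pyRange 0 n 3 = 0 :: PySem.List.pyRange 3 n 3 := by
  rw [PySem.List.pyRange_of_pos 0 n (by norm_num), PySem.List.pyRange_of_pos 3 n (by norm_num)]
  have h0 : ((0:Int) < n) := h
  by_cases h3 : (3:Int) < n
  · have hc : (if (0:Int) < n then ((n - 0 + 3 - 1) / 3).toNat else 0)
        = (if (3:Int) < n then ((n - 3 + 3 - 1) / 3).toNat else 0) + 1 := by
      rw [if_pos h0, if_pos h3]; omega
    rw [hc, List.range_succ_eq_map]
    simp only [List.map_cons, List.map_map]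
    refine List.cons_eq_cons.mpr ⟨by norm_num, ?_⟩
    apply List.map_congr_left
    intro k hk
    simp only [Function.comp]
    push_cast
    ring
  · rw [if_pos h0, if_neg h3]
    have h1 : ((n - 0 + 3 - 1) / 3).toNat = 1 := by omega
    rw [h1]
    norm_num

lemma pyRange3_shift (n : Int) :
    PySem.List.pyRange 3 n 3 = (PySem.List.pyRange 0 (n - 3) 3).map (· + 3) := by
  rw [PySem.List.pyRange_of_pos 3 n (by norm_num), PySem.List.pyRange_of_pos 0 (n - 3) (by norm_num),
    List.map_map]
  have h1 : ((3:Int) < n) ↔ ((0:Int) < n - 3) := by omega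
  have hc : (if (3:Int) < n then ((n - 3 + 3 - 1) / 3).toNat else 0)
      = (if (0:Int) < n - 3 then ((n - 3 - 0 + 3 - 1) / 3).toNat else 0) := by
    split_ifs with hA hB hB
    · omega
    · exact absurd (h1.mp hA) hB
    · exact absurd (h1.mpr hB) hA
    · rfl
  rw [hc]
  apply List.map_congr_left
  intro k _
  simp only [Function.comp]
  ring

lemma chunksEq_aux : ∀ (m : Nat) (cs : List Char), cs.length ≤ m →
    (PySem.List.pyRange 0 (cs.length : Int) 3).map
      (fun i => PySem.List.slice cs (some i) (some (i + 3))) = chunksOf cs := by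
  intro m
  induction m with
  | zero =>
      intro cs hm
      have : cs = [] := List.length_eq_zero_iff.mp (by omega)
      subst this
      simp only [List.length_nil, Nat.cast_zero]
      rw [PySem.List.pyRange_of_pos 0 0 (by norm_num)]
      simp [chunksOf]
  | succ m ih =>
      intro cs hm
      match cs with
      | [] =>
          simp only [List.length_nil, Nat.cast_zero]
          rw [PySem.List.pyRange_of_pos 0 0 (by norm_num)]
          simp [chunksOf]
      | x :: u =>
          have hpos : (0:Int) < ((x :: u).length : Int) := by
            simp only [List.length_cons]; push_cast; omega
          rw [pyRange3_cons _ hpos, pyRange3_shift, List.map_cons, List.map_map, chunksOf]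
          have hhead : PySem.List.slice (x :: u) (some 0) (some (0 + 3)) = (x :: u).take 3 := by
            have := PySem.List.slice_natCast_add (x :: u) 0 3
            simpa using this
          rw [hhead]
          congr 1
          by_cases hlen : 3 ≤ (x :: u).length
          · have hlen' : (((x :: u).drop 3).length : Int) = ((x :: u).length : Int) - 3 := by
              simp only [List.length_drop]; omega
            rw [← hlen']
            have htail : ∀ i ∈ PySem.List.pyRange 0 ((((x :: u).drop 3).length : Int)) 3,
                ((fun i => PySem.List.slice (x :: u) (some i) (some (i + 3))) ∘ (· + 3)) i
                  = PySem.List.slice ((x :: u).drop 3) (some i) (some (i + 3)) := by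
              intro i hi
              have hi' := (PySem.List.mem_pyRange_iff_of_pos (by norm_num) i).mp hi
              simp only [Function.comp]
              rw [PySem.List.slice_toNat _ (by omega) (by omega),
                PySem.List.slice_toNat _ (by omega) (by omega), List.drop_drop]
              congr 1
              · omega
              · congr 1; omega
            rw [List.map_congr_left htail]
            exact ih _ (by simp only [List.length_drop]; omega)
          · have h0 : ((x :: u).length : Int) - 3 ≤ 0 := by omega
            have hdrop : (x :: u).drop 3 = [] := List.drop_eq_nil_of_le (by omega)
            rw [hdrop, PySem.List.pyRange_of_pos 0 _ (by norm_num)]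
            have : ¬ ((0:Int) < ((x :: u).length : Int) - 3) := by omega
            rw [if_neg this]
            simp [chunksOf]

lemma mod3_eq_zero (k : Nat) : PySem.Int.mod (((3 * k + 3 : Nat)) : Int) 3 = 0 := by
  rw [mod3_natCast]
  have : (3 * k + 3) % 3 = 0 := by omega
  rw [this]; rfl

lemma mod3_ne_zero_1 (k : Nat) : ¬ PySem.Int.mod (((3 * k + 3 + 1 : Nat)) : Int) 3 = 0 := by
  rw [mod3_natCast]
  have : (3 * k + 3 + 1) % 3 = 1 := by omega
  rw [this]; decide

lemma mod3_ne_zero_2 (k : Nat) : ¬ PySem.Int.mod (((3 * k + 3 + 1 + 1 : Nat)) : Int) 3 = 0 := by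
  rw [mod3_natCast]
  have : (3 * k + 3 + 1 + 1) % 3 = 2 := by omega
  rw [this]; decide

-- main block correspondence: starting at an index ≡ 0 (mod 3), A's loop processes chunks
lemma block (ch : List Char) (max : Int) :
    ∀ (n : Nat) (u : List Char), u.length ≤ n → ∀ (k : Nat) (st : List Char × Int),
    gA ch max u (3 * k + 3) st = (chunksOf u).foldl (stepB ch max) st := by
  intro n
  induction n with
  | zero =>
      intro u hu k st
      have : u = [] := List.length_eq_zero_iff.mp (by omega)
      subst this
      simp [gA, chunksOf]
  | succ n ihn =>
      intro u hu k st
      have h1 : ∀ (cnt : Int), ¬ (PySem.Int.mod (((3 * k + 3 + 1 : Nat)) : Int) 3 = 0 ∧ cnt < max) :=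
        fun cnt hx => mod3_ne_zero_1 k hx.1
      have h2 : ∀ (cnt : Int), ¬ (PySem.Int.mod (((3 * k + 3 + 1 + 1 : Nat)) : Int) 3 = 0 ∧ cnt < max) :=
        fun cnt hx => mod3_ne_zero_2 k hx.1
      match u with
      | [] => simp [gA, chunksOf]
      | [a] =>
          rw [chunksOf]
          by_cases hc : st.2 < max
          · simp only [gA, if_pos (And.intro (mod3_eq_zero k) hc), stepB,
              List.foldl_cons, if_pos hc]
            simp [chunksOf]
          · have hneg : ¬ (PySem.Int.mod (((3 * k + 3 : Nat)) : Int) 3 = 0 ∧ st.2 < max) :=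
              fun hx => hc hx.2
            simp only [gA, if_neg hneg, stepB, List.foldl_cons, if_neg hc]
            simp [chunksOf]
      | [a, b] =>
          rw [chunksOf]
          by_cases hc : st.2 < max
          · simp only [gA, if_pos (And.intro (mod3_eq_zero k) hc), if_neg (h1 _), stepB,
              List.foldl_cons, if_pos hc]
            simp [chunksOf, List.append_assoc]
          · have hneg : ¬ (PySem.Int.mod (((3 * k + 3 : Nat)) : Int) 3 = 0 ∧ st.2 < max) :=
              fun hx => hc hx.2
            simp only [gA, if_neg hneg, if_neg (h1 _), stepB,
              List.foldl_cons, if_neg hc]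
            simp [chunksOf, List.append_assoc]
      | a :: b :: c :: v =>
          have hidx : 3 * k + 3 + 1 + 1 + 1 = 3 * (k + 1) + 3 := by ring
          have hstep : gA ch max (a :: b :: c :: v) (3 * k + 3) st
              = gA ch max v (3 * (k + 1) + 3) (stepB ch max st [a, b, c]) := by
            by_cases hc : st.2 < max
            · simp only [gA, if_pos (And.intro (mod3_eq_zero k) hc), if_neg (h1 _),
                if_neg (h2 _), hidx, stepB, if_pos hc]
              simp [List.append_assoc]
            · have hneg : ¬ (PySem.Int.mod (((3 * k + 3 : Nat)) : Int) 3 = 0 ∧ st.2 < max) :=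
                fun hx => hc hx.2
              simp only [gA, if_neg hneg, if_neg (h1 _), if_neg (h2 _), hidx, stepB, if_neg hc]
              simp [List.append_assoc]
          rw [hstep, chunksOf]
          simp only [List.take_succ_cons, List.take_zero, List.drop_succ_cons, List.drop_zero,
            List.foldl_cons]
          exact ihn v (by simp at hu ⊢; omega) (k + 1) (stepB ch max st [a, b, c])

lemma chunksEq (cs : List Char) :
    (PySem.List.pyRange 0 (cs.length : Int) 3).map
      (fun i => PySem.List.slice cs (some i) (some (i + 3))) = chunksOf cs :=
  chunksEq_aux cs.length cs le_rfl

-- A at chunk granularity: a fold of stepB over the later chunks, seeded with the first chunk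
lemma A_eq_fold (string char : String) (max : Int) (h : string ≠ "") :
    insert3 string char max
      = String.mk (((chunksOf string.toList).drop 1).foldl (stepB char.toList max)
          ((chunksOf string.toList).headD [], 0)).1 := by
  simp only [insert3]
  have hA := foldA string.toList char.toList max (string.toList.length - 1) 1 rfl
  push_cast at hA
  rw [hA ([PySem.List.pyGetD string.toList 0 ' '], 0)]
  have hcs : string.toList ≠ [] := by simpa using h
  have hx1 : ∀ (cnt : Int), ¬ (PySem.Int.mod (((1 : Nat)) : Int) 3 = 0 ∧ cnt < max) := by
    intro cnt hx
    have := hx.1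
    rw [mod3_natCast] at this
    exact absurd this (by decide)
  have hx2 : ∀ (cnt : Int), ¬ (PySem.Int.mod (((1 + 1 : Nat)) : Int) 3 = 0 ∧ cnt < max) := by
    intro cnt hx
    have := hx.1
    rw [mod3_natCast] at this
    exact absurd this (by decide)
  match hm : string.toList with
  | [] => exact absurd hm hcs
  | [x] =>
      rw [chunksOf]
      simp [gA, chunksOf]
  | [x, y] =>
      rw [chunksOf]
      simp only [gA, List.drop_succ_cons, List.drop_zero, PySem.List.pyGetD_zero_cons,
        if_neg (hx1 _)]
      simp [chunksOf]
  | x :: y :: z :: v =>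
      rw [chunksOf]
      simp only [gA, List.drop_succ_cons, List.drop_zero, PySem.List.pyGetD_zero_cons,
        if_neg (hx1 _), if_neg (hx2 _)]
      have e : (1 + 1 + 1 : Nat) = 3 * 0 + 3 := by norm_num
      rw [e, block char.toList max v.length v le_rfl 0]
      have hacc : ([x] ++ [y] ++ [z] : List Char) = [x, y, z] := by simp
      simp only [List.headD_cons, List.take_succ_cons, List.take_zero, List.drop_succ_cons,
        List.drop_zero]
      rw [hacc]

-- the fold's string component is the seed followed by joinWith
lemma fold_eq_joinWith (ch : List Char) (max : Int) :
    ∀ (L : List (List Char)) (acc : List Char) (c : Int),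
    (L.foldl (stepB ch max) (acc, c)).1 = acc ++ joinWith ch max c L := by
  intro L
  induction L with
  | nil => intro acc c; simp [joinWith]
  | cons x L ih =>
      intro acc c
      by_cases hc : c < max
      · simp only [List.foldl_cons, stepB, if_pos hc, joinWith, ih]
        simp [List.append_assoc]
      · simp only [List.foldl_cons, stepB, if_neg hc, joinWith, ih]
        simp [List.append_assoc]

-- closed form of joinWith: separators before the first (max - c)⁺ chunks, rest plain
lemma joinWith_closed (ch : List Char) (max : Int) :
    ∀ (L : List (List Char)) (c : Int),
    joinWith ch max c L
      = ((L.take (min L.length (max - c).toNat)).map (fun u => ch ++ u)).flatten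
        ++ (L.drop (min L.length (max - c).toNat)).flatten := by
  intro L
  induction L with
  | nil => intro c; simp [joinWith]
  | cons x L ih =>
      intro c
      by_cases hc : c < max
      · have ht : min (x :: L).length (max - c).toNat = min L.length (max - (c + 1)).toNat + 1 := by
          simp only [List.length_cons]; omega
        rw [joinWith, if_pos hc, ih (c + 1), ht]
        simp [List.append_assoc]
      · have ht : min (x :: L).length (max - c).toNat = 0 := by
          have : (max - c).toNat = 0 := by omega
          simp [this]
        have ht' : min L.length (max - c).toNat = 0 := by
          have : (max - c).toNat = 0 := by omega
          simp [this]
        rw [joinWith, if_neg hc, ih c, ht, ht']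
        simp [List.append_assoc]

lemma intercalate_cons (ch : List Char) :
    ∀ (L : List (List Char)) (x : List Char),
    List.intercalate ch (x :: L) = x ++ (L.map (fun u => ch ++ u)).flatten := by
  intro L
  induction L with
  | nil => intro x; simp [List.intercalate]
  | cons y L ih =>
      intro x
      have : List.intercalate ch (x :: y :: L) = x ++ ch ++ List.intercalate ch (y :: L) := by
        simp [List.intercalate, List.intersperse]
      rw [this, ih y]
      simp [List.append_assoc]

theorem insert3_eq (string char : String) (max : Int) (h : string ≠ "") :
    insert3 string char max = insert3_alt string char max := by
  rw [A_eq_fold string char max h]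
  simp only [insert3_alt, chunksEq]
  have hcs : string.toList ≠ [] := by simpa using h
  match hm : chunksOf string.toList with
  | [] =>
      exfalso
      match hv : string.toList with
      | [] => exact hcs hv
      | a :: u => rw [hv, chunksOf] at hm; exact List.cons_ne_nil _ _ hm
  | c0 :: L =>
      -- the inserted-separator count t, as a Nat
      set t : Nat := min L.length max.toNat with hts
      have hklen : ((c0 :: L).length : Int) - 1 = (L.length : Int) := by
        simp only [List.length_cons]; push_cast; ring
      set k : Int := if 0 < max then min (((c0 :: L).length : Int) - 1) max else 0 with hk
      have hk0 : 0 ≤ k := by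
        rw [hk]; split_ifs with hmx
        · rw [hklen]; omega
        · omega
      have hkt : (k + 1).toNat = t + 1 := by
        rw [hk, hts]; split_ifs with hmx
        · rw [hklen]; omega
        · omega
      rw [PySem.List.slice_to (c0 :: L) (by omega : (0:Int) ≤ k + 1),
        PySem.List.slice_from (c0 :: L) (by omega : (0:Int) ≤ k + 1), hkt]
      simp only [List.take_succ_cons, List.drop_succ_cons, List.drop_zero, List.headD_cons,
        List.drop_one, List.tail_cons]
      rw [fold_eq_joinWith, joinWith_closed, intercalate_cons]
      have hmin : min L.length (max - 0).toNat = t := by rw [hts]; omega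
      rw [hmin, List.append_assoc]

-- ===== VERDICT (by name: the statement is the Claim_ definition above) =====
theorem insert3_spec : Claim_equal_insert3 := by
  intro s c m _ hpre
  unfold Spec_insert3
  exact insert3_eq s c m hpre
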